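-- pv_equiv track=rewrite | github.com/esoto6/advent-of-code | 2023/day10/day10_part2.py | count_invs
-- ===== SOURCE A (Python) =====
-- def count_invs(graph, visited, i, j):
--     # WTF
--     line = graph[i]
--     line = "".join(line)
--     count = 0
--     for k in range(j):
--         if not (i, k) in visited:
--             continue
--         count += line[k] in {"J", "L", "|"}
--     return count
-- ===== SOURCE B (Python) =====
-- def count_invs(graph, visited, i, j):
--     line = "".join(graph[i])
--     return len([c for (r, c) in set(visited)
--                 if r == i and 0 <= c < j and line[c] in ("J", "L", "|")])
-- ===== Notes on version B (the rewrite author's own statement) =====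
-- stated objective: alternative
-- what changed: B builds the filtered list of qualifying cells from the deduplicated visited set and returns its length, instead of A's loop over every column index in range(j) with a set-membership probe and a running counter per column; no indexed column scan or accumulator loop remains.
import Mathlib
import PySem

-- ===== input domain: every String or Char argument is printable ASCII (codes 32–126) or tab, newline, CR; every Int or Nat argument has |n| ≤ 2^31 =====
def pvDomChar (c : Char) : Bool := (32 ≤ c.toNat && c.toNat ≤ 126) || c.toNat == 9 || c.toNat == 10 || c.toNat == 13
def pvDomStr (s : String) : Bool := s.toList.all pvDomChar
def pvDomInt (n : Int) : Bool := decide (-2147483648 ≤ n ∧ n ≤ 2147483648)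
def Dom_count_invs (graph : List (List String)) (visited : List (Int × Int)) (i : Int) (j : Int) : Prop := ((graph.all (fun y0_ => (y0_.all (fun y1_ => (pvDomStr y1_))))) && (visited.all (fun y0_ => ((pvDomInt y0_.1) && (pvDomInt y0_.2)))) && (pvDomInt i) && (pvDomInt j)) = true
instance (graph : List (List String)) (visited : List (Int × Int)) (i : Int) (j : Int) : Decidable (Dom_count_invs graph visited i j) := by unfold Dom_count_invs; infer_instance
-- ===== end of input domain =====

-- B replaces A's column-by-column counting loop over range(j) (one set probe per column) by a
-- filtered list comprehension over the deduplicated visited set whose length is returned;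
-- return value only, no mutation on either side.

-- ===== PORT A =====
-- line[k] in {"J","L","|"} as an Int addend (0 also when the index is out of range = IndexError,
-- which Pre_ excludes)
def pvCrossAddA (line : List Char) (k : Int) : Int :=
  match PySem.List.pyGet? line k with
  | some c => if c = 'J' ∨ c = 'L' ∨ c = '|' then 1 else 0
  | none => 0

def count_invs (graph : List (List String)) (visited : List (Int × Int)) (i : Int) (j : Int) : Int :=
  match PySem.List.pyGet? graph i with
  | none => 0  -- IndexError on graph[i]; excluded by Pre_
  | some row =>
    -- line = "".join(line): the concatenated code points of the row
    let line : List Char := (row.map String.toList).flatten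
    (PySem.List.pyRange 0 j 1).foldl
      (fun count k =>
        if (i, k) ∉ visited then count
        else count + pvCrossAddA line k) 0

-- ===== PORT B =====
-- the comprehension filter: r == i and 0 <= c < j and line[c] in ("J","L","|")
-- (line[c] evaluated via pyGet?, false when out of range = IndexError, excluded by Pre_)
def pvKeepB (line : List Char) (i j : Int) (rc : Int × Int) : Bool :=
  rc.1 == i && decide (0 ≤ rc.2) && decide (rc.2 < j) &&
    ((PySem.List.pyGet? line rc.2).elim false (fun ch => ch == 'J' || ch == 'L' || ch == '|'))

def count_invs_alt (graph : List (List String)) (visited : List (Int × Int)) (i : Int) (j : Int) : Int :=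
  match PySem.List.pyGet? graph i with
  | none => 0
  | some row =>
    let line : List Char := (row.map String.toList).flatten
    (((PySem.Set.ofList visited).filter (pvKeepB line i j)).map Prod.snd).length

-- ===== PRECONDITION & SPEC =====
-- Pre_ excludes exactly the inputs where A raises: i out of range for graph (IndexError on
-- graph[i]), or some visited pair (i, c) with 0 ≤ c < j indexes past the end of the joined row
-- (IndexError on line[c]); B raises on the same inputs.
def Pre_count_invs (graph : List (List String)) (visited : List (Int × Int)) (i : Int) (j : Int) : Prop :=
  PySem.Raise.InRange graph.length i ∧
  ∀ p ∈ visited, p.1 = i → 0 ≤ p.2 → p.2 < j →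
    p.2 < ((((PySem.List.pyGet? graph i).getD []).map String.toList).flatten.length : Int)
instance (graph : List (List String)) (visited : List (Int × Int)) (i : Int) (j : Int) : Decidable (Pre_count_invs graph visited i j) := by unfold Pre_count_invs; infer_instance

def pvWitness_count_invs : List (List String) × (List (Int × Int)) × Int × Int :=
  ([["J|", "L."], ["--"]], [(0, 0), (0, 2), (1, 1), (0, -3)], 0, 3)

def Spec_count_invs (graph : List (List String)) (visited : List (Int × Int)) (i : Int) (j : Int) (out : Int) : Prop := out = count_invs_alt graph visited i j
instance (graph : List (List String)) (visited : List (Int × Int)) (i : Int) (j : Int) (out : Int) : Decidable (Spec_count_invs graph visited i j out) := by unfold Spec_count_invs; infer_instance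

-- ===== CLAIM (what is proved, stated in full; the proofs are below) =====
def Claim_equal_count_invs : Prop := ∀ (graph : List (List String)) (visited : List (Int × Int)) (i : Int) (j : Int), Dom_count_invs graph visited i j → Pre_count_invs graph visited i j → Spec_count_invs graph visited i j (count_invs graph visited i j)

-- ===== LEMMAS AND PROOFS =====

-- both sides count the same finite set of cells: {(i, k) ∈ visited | 0 ≤ k < j, line[k] crossing}
theorem pv_key (visited : List (Int × Int)) (i j : Int) (line : List Char) :
    ((PySem.List.pyRange 0 j 1).countP
        (fun k => decide ((i, k) ∈ visited) && pvKeepB line i j (i, k)))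
  = ((PySem.Set.ofList visited).countP (pvKeepB line i j)) := by
  rw [List.countP_eq_length_filter, List.countP_eq_length_filter]
  have hperm :
      ((PySem.Set.ofList visited).filter (pvKeepB line i j)).Perm
      (((PySem.List.pyRange 0 j 1).filter
        (fun k => decide ((i, k) ∈ visited) && pvKeepB line i j (i, k))).map (fun k => (i, k))) := by
    apply (List.perm_ext_iff_of_nodup ?_ ?_).mpr
    · intro rc
      obtain ⟨r, c⟩ := rc
      simp only [List.mem_filter, List.mem_map, PySem.Set.mem_ofList,
        PySem.List.mem_pyRange_one, pvKeepB, Bool.and_eq_true, beq_iff_eq,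
        decide_eq_true_eq, Prod.mk.injEq]
      constructor
      · rintro ⟨hm, ⟨⟨hr, h0⟩, hj⟩, hc⟩
        exact ⟨c, ⟨⟨h0, hj⟩, hr ▸ hm, ⟨⟨trivial, h0⟩, hj⟩, hc⟩, hr.symm, rfl⟩
      · rintro ⟨k, ⟨⟨h0, hj⟩, hm, -, hc⟩, hi, hk⟩
        subst hk
        exact ⟨hi ▸ hm, ⟨⟨hi.symm, h0⟩, hj⟩, hc⟩
    · exact ((PySem.Set.nodup_ofList visited).filter _)
    · refine List.Nodup.map ?_ ((PySem.List.nodup_pyRange_one 0 j).filter _)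
      intro a b h
      simpa using h
  have := hperm.length_eq
  simpa using this.symm

theorem count_invs_spec : Claim_equal_count_invs := by
  intro graph visited i j _ hpre
  obtain ⟨hin, hbd⟩ := hpre
  obtain ⟨row, hrow⟩ : ∃ row, PySem.List.pyGet? graph i = some row := by
    cases h : PySem.List.pyGet? graph i with
    | none => exact absurd hin (by simpa [PySem.List.pyGet?_eq_none_iff] using h)
    | some r => exact ⟨r, rfl⟩
  unfold Spec_count_invs count_invs count_invs_alt
  rw [hrow]
  simp only
  rw [hrow] at hbd
  simp only [Option.getD_some] at hbd
  set line : List Char := (row.map String.toList).flatten with hline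
  have hA :
      (PySem.List.pyRange 0 j 1).foldl
        (fun count k => if (i, k) ∉ visited then count else count + pvCrossAddA line k) 0
    = (PySem.List.pyRange 0 j 1).foldl
        (fun count k => if (decide ((i, k) ∈ visited) && pvKeepB line i j (i, k)) = true
          then count + 1 else count) 0 := by
    apply PySem.List.foldl_congr_mem
    intro acc k hk
    rw [PySem.List.mem_pyRange_one] at hk
    by_cases hm : (i, k) ∈ visited
    · have hlen : k < (line.length : Int) := hbd (i, k) hm rfl hk.1 hk.2
      obtain ⟨ch, hget⟩ : ∃ ch, PySem.List.pyGet? line k = some ch :=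
        ⟨_, PySem.List.pyGet?_eq_some_getElem line hk.1 hlen⟩
      simp only [hm, not_true_eq_false, if_false, pvCrossAddA, pvKeepB, hget,
        decide_true, Bool.true_and, Option.elim_some, beq_self_eq_true,
        decide_eq_true hk.1, decide_eq_true hk.2]
      by_cases hc : ch = 'J' ∨ ch = 'L' ∨ ch = '|'
      · rw [if_pos hc, if_pos (by simp only [Bool.or_eq_true, beq_iff_eq]; tauto)]
      · rw [if_neg hc, if_neg (by simp only [Bool.or_eq_true, beq_iff_eq]; tauto), add_zero]
    · simp [hm, pvKeepB]
  rw [hA]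
  have hB :
      ((((PySem.Set.ofList visited).filter (pvKeepB line i j)).map Prod.snd).length : Int)
        = ((PySem.Set.ofList visited).countP (pvKeepB line i j) : Int) := by
    rw [List.length_map, List.countP_eq_length_filter]
  rw [hB, ← pv_key]
  rw [PySem.List.foldl_if_add_one]
  simp
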